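-- pv_equiv track=rewrite | github.com/amerelsamman/Compostability_Model_II | databasegeneration_filtered.py | _generate_full_exploration_combinations
-- ===== SOURCE A (Python) =====
-- from typing import List, Tuple, Dict, Any
-- from itertools import combinations
--
-- def _generate_full_exploration_combinations(polymer_groups: Dict, polymer_types: List[str],
--                                           n_polymers: int, max_remaining: int) -> List[List[Tuple[str, str]]]:
--     """Generate full exploration combinations."""
--     combinations_list = []
--
--     # Generate combinations of polymer types
--     for polymer_combo in combinations(polymer_types, n_polymers):
--         # For each polymer type, try all materials
--         polymer_materials = []
--
--         for polymer_type in polymer_combo: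
--             if polymer_type in polymer_groups:
--                 polymer_materials.append(polymer_groups[polymer_type])
--
--         # Generate all combinations of materials from different polymer types
--         if polymer_materials:
--             from itertools import product
--             for material_combo in product(*polymer_materials):
--                 combinations_list.append(list(material_combo))
--
--     return combinations_list[:max_remaining]
-- ===== SOURCE B (Python) =====
-- from typing import List, Tuple, Dict, Any
--
-- def _generate_full_exploration_combinations(polymer_groups: Dict, polymer_types: List[str],
--                                           n_polymers: int, max_remaining: int) -> List[List[Tuple[str, str]]]:
--     """Generate full exploration combinations (recursive choose fused with lookup, accumulator product)."""
--     def choose_pools(types, k):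
--         # lists of material-pools, one list per k-combination of types (index-lexicographic order),
--         # with the group lookup done while choosing (absent types contribute no pool)
--         if k == 0:
--             return [[]]
--         if not types:
--             return []
--         head, rest = types[0], types[1:]
--         head_pool = [polymer_groups[head]] if head in polymer_groups else []
--         return [head_pool + p for p in choose_pools(rest, k - 1)] + choose_pools(rest, k)
--
--     out = []
--     for pools in choose_pools(polymer_types, n_polymers):
--         if pools:
--             acc = [[]]
--             for pool in pools:
--                 acc = [r + [m] for r in acc for m in pool]
--             out.extend(acc)
--     return out[:max_remaining]
-- ===== Notes on version B (the rewrite author's own statement) =====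
-- stated objective: alternative
-- what changed: Replaces itertools.combinations + membership-filter loop + itertools.product with one recursion that chooses the type-combination and performs the group lookup while choosing, followed by an accumulator-style cartesian product ([r+[m] for r in acc for m in pool]).
import Mathlib
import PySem

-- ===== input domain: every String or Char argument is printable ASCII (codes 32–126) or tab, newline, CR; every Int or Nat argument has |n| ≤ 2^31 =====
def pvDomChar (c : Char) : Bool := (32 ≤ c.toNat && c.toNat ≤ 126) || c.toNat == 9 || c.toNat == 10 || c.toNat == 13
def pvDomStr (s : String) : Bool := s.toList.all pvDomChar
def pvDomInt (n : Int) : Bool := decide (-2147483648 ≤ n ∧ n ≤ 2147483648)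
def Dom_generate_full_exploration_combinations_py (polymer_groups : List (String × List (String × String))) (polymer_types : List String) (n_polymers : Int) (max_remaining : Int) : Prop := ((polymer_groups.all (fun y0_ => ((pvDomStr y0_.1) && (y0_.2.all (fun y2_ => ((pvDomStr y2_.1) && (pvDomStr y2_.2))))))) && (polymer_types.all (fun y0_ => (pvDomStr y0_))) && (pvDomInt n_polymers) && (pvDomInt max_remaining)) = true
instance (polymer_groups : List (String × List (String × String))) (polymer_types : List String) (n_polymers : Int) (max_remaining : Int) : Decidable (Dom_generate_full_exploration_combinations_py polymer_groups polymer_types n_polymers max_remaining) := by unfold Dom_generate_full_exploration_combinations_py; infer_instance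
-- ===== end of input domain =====

-- B replaces itertools.combinations/product with one recursion that chooses the type-combination
-- and looks the pools up as it chooses, plus an accumulator-style cartesian product (objective:
-- alternative decomposition, same asymptotic cost).

-- ===== PORT A =====
-- dict lookup on the association list: first match (Python dict convention here)
def pvLookup (pg : List (String × List (String × String))) (t : String) : Option (List (String × String)) :=
  (pg.find? (fun kv => kv.1 == t)).map (·.2)

-- itertools.combinations(l, k): k-element subsequences in index-lexicographic order
def pvCombA {α : Type} : List α → Nat → List (List α)
  | _, 0 => [[]]
  | [], _ + 1 => []
  | x :: xs, k + 1 => (pvCombA xs k).map (fun c => x :: c) ++ pvCombA xs (k + 1)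

-- itertools.product(*pools): leftmost pool varies slowest
def pvProdA {α : Type} : List (List α) → List (List α)
  | [] => [[]]
  | p :: ps => p.flatMap (fun x => (pvProdA ps).map (fun q => x :: q))

def generate_full_exploration_combinations_py (polymer_groups : List (String × List (String × String))) (polymer_types : List String) (n_polymers : Int) (max_remaining : Int) : List (List (String × String)) :=
  let combinations_list :=
    (pvCombA polymer_types n_polymers.toNat).foldl (fun acc polymer_combo =>
      let polymer_materials := polymer_combo.foldl (fun ps t =>
        match pvLookup polymer_groups t with
        | some v => ps ++ [v]
        | none => ps) []
      if polymer_materials.isEmpty then acc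
      else (pvProdA polymer_materials).foldl (fun a mc => a ++ [mc]) acc) []
  PySem.List.slice combinations_list none (some max_remaining)

-- ===== PORT B =====
-- choose_pools(types, k): for each k-combination of types (same index-lex order), the list of
-- looked-up material pools, the lookup fused into the choice
def pvChoosePools (pg : List (String × List (String × String))) : List String → Int → List (List (List (String × String)))
  | types, k =>
    if k = 0 then [[]]
    else match types with
      | [] => []
      | t :: rest =>
        let headPool := match pvLookup pg t with
          | some v => [v]
          | none => []
        ((pvChoosePools pg rest (k - 1)).map (fun p => headPool ++ p)) ++ pvChoosePools pg rest k
termination_by structural types => types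

def generate_full_exploration_combinations_py_alt (polymer_groups : List (String × List (String × String))) (polymer_types : List String) (n_polymers : Int) (max_remaining : Int) : List (List (String × String)) :=
  let out := (pvChoosePools polymer_groups polymer_types n_polymers).foldl (fun out pools =>
    if pools.isEmpty then out
    else out ++ pools.foldl (fun acc pool => acc.flatMap (fun r => pool.map (fun m => r ++ [m]))) [[]]) []
  PySem.List.slice out none (some max_remaining)

-- ===== PRECONDITION & SPEC =====
-- Pre_ excludes n_polymers < 0, on which A raises ValueError (itertools.combinations).
def Pre_generate_full_exploration_combinations_py (polymer_groups : List (String × List (String × String))) (polymer_types : List String) (n_polymers : Int) (max_remaining : Int) : Prop := 0 ≤ n_polymers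
instance (polymer_groups : List (String × List (String × String))) (polymer_types : List String) (n_polymers : Int) (max_remaining : Int) : Decidable (Pre_generate_full_exploration_combinations_py polymer_groups polymer_types n_polymers max_remaining) := by unfold Pre_generate_full_exploration_combinations_py; infer_instance
def pvWitness_generate_full_exploration_combinations_py : (List (String × List (String × String))) × List String × Int × Int := ([("a", [("x", "1")])], ["a"], 1, 5)

def Spec_generate_full_exploration_combinations_py (polymer_groups : List (String × List (String × String))) (polymer_types : List String) (n_polymers : Int) (max_remaining : Int) (out : List (List (String × String))) : Prop := out = generate_full_exploration_combinations_py_alt polymer_groups polymer_types n_polymers max_remaining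
instance (polymer_groups : List (String × List (String × String))) (polymer_types : List String) (n_polymers : Int) (max_remaining : Int) (out : List (List (String × String))) : Decidable (Spec_generate_full_exploration_combinations_py polymer_groups polymer_types n_polymers max_remaining out) := by unfold Spec_generate_full_exploration_combinations_py; infer_instance

-- ===== CLAIM (what is proved, stated in full; the proofs are below) =====
def Claim_equal_generate_full_exploration_combinations_py : Prop := ∀ (polymer_groups : List (String × List (String × String))) (polymer_types : List String) (n_polymers : Int) (max_remaining : Int), Dom_generate_full_exploration_combinations_py polymer_groups polymer_types n_polymers max_remaining → Pre_generate_full_exploration_combinations_py polymer_groups polymer_types n_polymers max_remaining → Spec_generate_full_exploration_combinations_py polymer_groups polymer_types n_polymers max_remaining (generate_full_exploration_combinations_py polymer_groups polymer_types n_polymers max_remaining)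

-- ===== LEMMAS AND PROOFS =====

-- A's inner material-collection loop is a filterMap over the combo
theorem pv_inner_fold (pg : List (String × List (String × String))) (combo : List String) (init : List (List (String × String))) :
    combo.foldl (fun ps t =>
      match pvLookup pg t with
      | some v => ps ++ [v]
      | none => ps) init = init ++ combo.filterMap (pvLookup pg) := by
  induction combo generalizing init with
  | nil => simp
  | cons t rest ih =>
    simp only [List.foldl_cons, List.filterMap_cons]
    cases h : pvLookup pg t <;> simp [ih]

-- B's fused recursion = A's combinations followed by the lookup filterMap
theorem pv_choose_eq (pg : List (String × List (String × String))) (types : List String) (k : Nat) :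
    pvChoosePools pg types (k : Int) = (pvCombA types k).map (List.filterMap (pvLookup pg)) := by
  induction types generalizing k with
  | nil =>
    cases k with
    | zero => simp [pvChoosePools, pvCombA]
    | succ s =>
      rw [pvChoosePools]
      rw [if_neg (by omega : ¬((s + 1 : Nat) : Int) = 0)]
      simp [pvCombA]
  | cons t rest ih =>
    cases k with
    | zero => simp [pvChoosePools, pvCombA]
    | succ s =>
      rw [pvChoosePools]
      have h1 : ((s + 1 : Nat) : Int) ≠ 0 := by omega
      have h2 : ((s + 1 : Nat) : Int) - 1 = (s : Int) := by omega
      simp only [h1, h2, ih, pvCombA, List.map_append, List.map_map]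
      cases h : pvLookup pg t <;>
        simp [h, Function.comp]

-- accumulator cartesian product = itertools.product, appended behind acc
theorem pv_prod_eq (pools : List (List (String × String))) (acc : List (List (String × String))) :
    pools.foldl (fun acc pool => acc.flatMap (fun r => pool.map (fun m => r ++ [m]))) acc
      = acc.flatMap (fun r => (pvProdA pools).map (fun q => r ++ q)) := by
  induction pools generalizing acc with
  | nil => simp [pvProdA]
  | cons p ps ih =>
    rw [List.foldl_cons, ih]
    simp only [pvProdA]
    rw [List.flatMap_assoc]
    simp [List.flatMap_map, List.map_flatMap, List.map_map, Function.comp_def, List.append_assoc]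

-- the two outer loops agree step by step once B's list is seen as A's combinations
theorem pv_foldl_steps (pg : List (String × List (String × String))) (L : List (List String)) (acc : List (List (String × String))) :
    L.foldl (fun acc polymer_combo =>
      let polymer_materials := polymer_combo.foldl (fun ps t =>
        match pvLookup pg t with
        | some v => ps ++ [v]
        | none => ps) []
      if polymer_materials.isEmpty then acc
      else (pvProdA polymer_materials).foldl (fun a mc => a ++ [mc]) acc) acc
    = L.foldl (fun out c =>
      let pools := c.filterMap (pvLookup pg)
      if pools.isEmpty then out
      else out ++ pools.foldl (fun acc pool => acc.flatMap (fun r => pool.map (fun m => r ++ [m]))) [[]]) acc := by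
  induction L generalizing acc with
  | nil => rfl
  | cons c L ih =>
    rw [List.foldl_cons, List.foldl_cons, ih]
    congr 1
    rw [pv_inner_fold]
    simp only [List.nil_append]
    by_cases hc : (c.filterMap (pvLookup pg)).isEmpty
    · simp [hc]
    · simp [hc, pv_prod_eq]
      rw [← List.flatMap_def]
      exact List.flatMap_singleton' _

-- ===== VERDICT (by name: the statement is the Claim_ definition above) =====
theorem generate_full_exploration_combinations_py_spec : Claim_equal_generate_full_exploration_combinations_py := by
  intro pg pt n m _ hpre
  unfold Spec_generate_full_exploration_combinations_py
  unfold generate_full_exploration_combinations_py generate_full_exploration_combinations_py_alt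
  have hn : ((n.toNat : Nat) : Int) = n := Int.toNat_of_nonneg hpre
  conv_rhs => rw [← hn]
  rw [pv_choose_eq, List.foldl_map, pv_foldl_steps]
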